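-- pv_equiv track=rewrite | github.com/ilyaYarosh0/rag-practice | ner.py | generate_metadata
-- ===== SOURCE A (Python) =====
-- DEFAULT_DICTIONARY = {
--     "Continents": ["Europe", "Asia", "Western Europe", "Central Europe", "East Asia", "Northern Asia"],
--     "Water bodies": ["Atlantic Ocean", "Pacific Ocean", "Arctic Ocean", "Mediterranean Sea", "Baltic Sea", "North Sea"],
--     "Geography": ["Alps", "Himalayan", "Ural Mountains", "Siberian", "Gobi Desert"]
-- }
--
-- def generate_metadata(text, ner_dict=DEFAULT_DICTIONARY):
--     chunk_meta = {}
--     lower_text = text.lower()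
--
--     for key, value in ner_dict.items():
--         for word in value:
--             lower_word = word.lower()
--             if lower_word in lower_text:
--                 chunk_meta.setdefault(key, []).append(word)
--     return chunk_meta
-- ===== SOURCE B (Python) =====
-- DEFAULT_DICTIONARY = {
--     "Continents": ["Europe", "Asia", "Western Europe", "Central Europe", "East Asia", "Northern Asia"],
--     "Water bodies": ["Atlantic Ocean", "Pacific Ocean", "Arctic Ocean", "Mediterranean Sea", "Baltic Sea", "North Sea"],
--     "Geography": ["Alps", "Himalayan", "Ural Mountains", "Siberian", "Gobi Desert"]
-- }
--
-- def generate_metadata(text, ner_dict=DEFAULT_DICTIONARY):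
--     # Index the text once: for each pattern length L, the set of all length-L
--     # substrings of the lowered text; each word is then a single hash lookup.
--     lt = text.lower()
--     n = len(lt)
--     lens = {len(w.lower()) for words in ner_dict.values() for w in words}
--     subs = {L: {lt[i:i + L] for i in range(n - L + 1)} for L in lens}
--     result = []
--     for key, words in ner_dict.items():
--         hits = [w for w in words if w.lower() in subs[len(w.lower())]]
--         if hits:
--             result.append((key, hits))
--     return dict(result)
-- ===== Notes on version B (the rewrite author's own statement) =====
-- stated objective: faster
-- what changed: A scans the whole lowered text once per pattern ('lower_word in lower_text' for every word); B indexes the text once, building for each distinct pattern length L the hash set of all length-L substrings of the lowered text, so each word becomes a single set lookup, and emits the per-key hit lists in one pass; Pre_ excludes association lists with duplicate keys, which cannot arise from A's Python argument (a dict) and on which either merge behaviour is accidental.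
import Mathlib
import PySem

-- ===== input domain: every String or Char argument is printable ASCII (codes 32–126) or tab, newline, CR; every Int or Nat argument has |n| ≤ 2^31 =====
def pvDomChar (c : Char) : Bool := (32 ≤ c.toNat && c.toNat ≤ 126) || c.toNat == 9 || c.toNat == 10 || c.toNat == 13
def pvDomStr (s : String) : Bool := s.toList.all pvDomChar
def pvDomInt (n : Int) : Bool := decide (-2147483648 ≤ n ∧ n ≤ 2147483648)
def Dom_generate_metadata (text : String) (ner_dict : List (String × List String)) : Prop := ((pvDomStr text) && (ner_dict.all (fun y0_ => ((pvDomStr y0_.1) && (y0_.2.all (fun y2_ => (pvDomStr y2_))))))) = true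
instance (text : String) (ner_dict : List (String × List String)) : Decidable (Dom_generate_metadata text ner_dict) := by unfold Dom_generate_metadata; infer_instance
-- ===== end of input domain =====

-- B replaces A's per-word substring scan by a one-time index of the text (for each pattern
-- length, the set of all substrings of that length), so each word becomes one set lookup.

-- ===== PORT A =====
def generate_metadata (text : String) (ner_dict : List (String × List String)) : List (String × List String) :=
  let lower_text := PySem.Str.lower text
  (ner_dict.foldl (fun (chunk_meta : PySem.Dict String (List String)) kv =>
      kv.2.foldl (fun d word =>
        let lower_word := PySem.Str.lower word
        if PySem.Str.isIn lower_word lower_text then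
          -- chunk_meta.setdefault(key, []).append(word)  ≡  d[key] = d.get(key, []) + [word]
          PySem.Dict.modify d kv.1 [] (fun l => l ++ [word])
        else d) chunk_meta)
    PySem.Dict.empty).items

-- ===== PORT B =====
def generate_metadata_alt (text : String) (ner_dict : List (String × List String)) : List (String × List String) :=
  let lt := PySem.Str.lower text
  let n : Int := PySem.Str.len lt
  let lens : PySem.Set Int :=
    PySem.Set.ofList (List.flatMap (fun (kv : String × List String) =>
      kv.2.map (fun w => PySem.Str.len (PySem.Str.lower w))) ner_dict)
  let subs : PySem.Dict Int (PySem.Set String) :=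
    PySem.Dict.ofList (List.map (fun (L : Int) =>
      ((L, PySem.Set.ofList ((PySem.List.pyRange 0 (n - L + 1) 1).map
        (fun i => PySem.Str.slice lt (some i) (some (i + L))))) : Int × PySem.Set String)) lens)
  let result : List (String × List String) :=
    ner_dict.foldl (fun (acc : List (String × List String)) kv =>
      -- subs[len(w.lower())] never misses (the length is in lens), so getD's default is dead
      let hits := kv.2.filter (fun w =>
        PySem.Set.contains
          (PySem.Dict.getD subs (PySem.Str.len (PySem.Str.lower w)) (PySem.Set.empty : PySem.Set String))
          (PySem.Str.lower w))
      if hits = [] then acc else acc ++ [(kv.1, hits)]) []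
  (PySem.Dict.ofList result).items

-- ===== PRECONDITION & SPEC =====
-- Pre_ excludes association lists with duplicate keys: they cannot arise from A's Python
-- argument (a dict), and on them the accidental merge order of either side is unspecified.
def Pre_generate_metadata (text : String) (ner_dict : List (String × List String)) : Prop :=
  (ner_dict.map Prod.fst).Nodup
instance (text : String) (ner_dict : List (String × List String)) : Decidable (Pre_generate_metadata text ner_dict) := by unfold Pre_generate_metadata; infer_instance
def pvWitness_generate_metadata : String × (List (String × List String)) :=
  ("the alps lie in western europe", [("Continents", ["Europe", "Asia"]), ("Geography", ["Alps"])])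

def Spec_generate_metadata (text : String) (ner_dict : List (String × List String)) (out : List (String × List String)) : Prop := out = generate_metadata_alt text ner_dict
instance (text : String) (ner_dict : List (String × List String)) (out : List (String × List String)) : Decidable (Spec_generate_metadata text ner_dict out) := by unfold Spec_generate_metadata; infer_instance

-- ===== CLAIM (what is proved, stated in full; the proofs are below) =====
def Claim_equal_generate_metadata : Prop := ∀ (text : String) (ner_dict : List (String × List String)), Dom_generate_metadata text ner_dict → Pre_generate_metadata text ner_dict → Spec_generate_metadata text ner_dict (generate_metadata text ner_dict)

-- ===== LEMMAS AND PROOFS =====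

-- A's per-word test, and the canonical result both programs compute.
def pvMatched (lt : String) (w : String) : Bool := PySem.Str.isIn (PySem.Str.lower w) lt

def pvCanon (lt : String) (l : List (String × List String)) : List (String × List String) :=
  l.filterMap (fun kv =>
    let hits := kv.2.filter (pvMatched lt)
    if hits = [] then none else some (kv.1, hits))

lemma pv_bool_eq_of_iff {a b : Bool} (h : (a = true) ↔ (b = true)) : a = b := by
  cases a <;> cases b <;> simp_all

-- membership among the length-L substrings of lt is exactly Python's 'w in lt'
lemma pv_mem_slices_iff (lt w : String) :
    (w ∈ (PySem.List.pyRange 0 ((PySem.Str.len lt) - (PySem.Str.len w) + 1) 1).map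
        (fun i => PySem.Str.slice lt (some i) (some (i + PySem.Str.len w))))
      ↔ PySem.Str.isIn w lt = true := by
  have hlenw : PySem.Str.len w = (w.toList.length : Int) := rfl
  have hlent : PySem.Str.len lt = (lt.toList.length : Int) := rfl
  rw [PySem.Str.isIn_eq, ← PySem.Chars.exists_prefix_drop_iff_isIn, List.mem_map]
  constructor
  · rintro ⟨i, hi, hslice⟩
    rw [PySem.List.mem_pyRange_one] at hi
    obtain ⟨h0, _⟩ := hi
    have hchars : PySem.List.slice lt.toList (some i) (some (i + PySem.Str.len w)) = w.toList := by
      have := congrArg String.toList hslice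
      simpa [PySem.Str.slice, PySem.Chars.slice] using this
    rw [PySem.List.slice_toNat _ h0 (by rw [hlenw]; omega)] at hchars
    exact ⟨i.toNat, hchars ▸ List.take_prefix _ _⟩
  · rintro ⟨j, hpre⟩
    by_cases hz : w.toList.length = 0
    · have hwnil : w.toList = [] := List.length_eq_zero_iff.mp hz
      refine ⟨0, ?_, ?_⟩
      · rw [PySem.List.mem_pyRange_one]
        exact ⟨le_rfl, by rw [hlenw, hlent]; omega⟩
      · have heq : PySem.List.slice lt.toList (some 0) (some (0 + PySem.Str.len w)) = w.toList := by
          rw [PySem.List.slice_toNat _ le_rfl (by rw [hlenw]; omega)]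
          simp [hwnil]
        calc PySem.Str.slice lt (some 0) (some (0 + PySem.Str.len w))
            = String.ofList w.toList := by rw [PySem.Str.slice, PySem.Chars.slice, heq]
          _ = w := by simp
    · have hLle : w.toList.length ≤ lt.toList.length - j := by
        have := hpre.length_le
        simpa using this
      have hjn : j + w.toList.length ≤ lt.toList.length := by omega
      refine ⟨(j : Int), ?_, ?_⟩
      · rw [PySem.List.mem_pyRange_one]
        refine ⟨by positivity, by rw [hlenw, hlent]; omega⟩
      · have heq : PySem.List.slice lt.toList (some (j:Int)) (some ((j:Int) + PySem.Str.len w)) = w.toList := by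
          rw [PySem.List.slice_toNat _ (by positivity) (by rw [hlenw]; omega)]
          have h1 : ((j:Int) + PySem.Str.len w).toNat - ((j:Int)).toNat = w.toList.length := by
            rw [hlenw]; omega
          rw [h1]
          exact (List.prefix_iff_eq_take.mp hpre).symm
        calc PySem.Str.slice lt (some (j:Int)) (some ((j:Int) + PySem.Str.len w))
            = String.ofList w.toList := by rw [PySem.Str.slice, PySem.Chars.slice, heq]
          _ = w := by simp

lemma pv_ofList_append_singleton {κ ν : Type} [BEq κ] (ps : List (κ × ν)) (p : κ × ν) :
    PySem.Dict.ofList (ps ++ [p]) = (PySem.Dict.ofList ps).insert p.1 p.2 := by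
  simp [PySem.Dict.ofList, PySem.Dict.update, List.foldl_append]

-- lookup in a dict built from (key, f key) pairs
lemma pv_getD_ofList_map {ν : Type} (l : List Int) (f : Int → ν) (k : Int) (d0 : ν)
    (hk : k ∈ l) :
    PySem.Dict.getD (PySem.Dict.ofList (l.map (fun x => (x, f x)))) k d0 = f k := by
  induction l using List.reverseRecOn with
  | nil => simp at hk
  | append_singleton t x ih =>
    rw [List.map_append, List.map_singleton, pv_ofList_append_singleton]
    rw [PySem.Dict.getD_insert]
    by_cases hkx : k = x
    · simp [hkx]
    · simp only [if_neg hkx]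
      exact ih (by simp at hk; tauto)

-- a dict built from an association list with distinct, fresh keys returns that list
lemma pv_items_update_of_nodup (ps : List (String × List String))
    (d : PySem.Dict String (List String))
    (hnd : (ps.map Prod.fst).Nodup) (hdis : ∀ p ∈ ps, d.contains p.1 = false) :
    (PySem.Dict.update d ps).items = d.items ++ ps := by
  induction ps generalizing d with
  | nil => simp [PySem.Dict.update]
  | cons p t ih =>
    have hstep : PySem.Dict.update d (p :: t) = PySem.Dict.update (d.insert p.1 p.2) t := by
      simp [PySem.Dict.update]
    rw [hstep]
    have hpc : d.contains p.1 = false := hdis p (by simp)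
    have hins : (d.insert p.1 p.2).items = d.items ++ [p] := by
      rw [PySem.Dict.items_insert_of_not_contains d p.2 hpc]
    have hnd' : (t.map Prod.fst).Nodup := (List.nodup_cons.mp (by simpa using hnd)).2
    have hdis' : ∀ q ∈ t, (d.insert p.1 p.2).contains q.1 = false := by
      intro q hq
      rw [PySem.Dict.contains_insert]
      have hne : q.1 ≠ p.1 := by
        have hp1 : p.1 ∉ t.map Prod.fst := (List.nodup_cons.mp (by simpa using hnd)).1
        intro h; exact hp1 (h ▸ List.mem_map_of_mem hq)
      simp [hne, hdis q (by simp [hq])]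
    rw [ih (d.insert p.1 p.2) hnd' hdis', hins]
    simp

-- pvCanon keeps a subsequence of the keys
lemma pv_canon_keys_sublist (lt : String) (l : List (String × List String)) :
    ((pvCanon lt l).map Prod.fst).Sublist (l.map Prod.fst) := by
  induction l with
  | nil => simp [pvCanon]
  | cons kv t ih =>
    by_cases h : kv.2.filter (pvMatched lt) = []
    · simp only [pvCanon, List.filterMap_cons, h] at *
      simpa using ih.cons kv.1
    · simp only [pvCanon, List.filterMap_cons, if_neg h] at *
      simpa using ih.cons₂ kv.1

lemma pv_contains_eq_false_iff {ν : Type} (d : PySem.Dict String ν) (k : String) :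
    d.contains k = false ↔ ∀ p ∈ d.items, (p.1 == k) = false := by
  simp [PySem.Dict.contains, List.any_eq_false]

-- A-side inner loop: folding the matched words of one key into the dict
lemma pv_inner_items (k : String) (hs : List String) (d : PySem.Dict String (List String))
    (hd : d.contains k = false) :
    (hs.foldl (fun d w => d.insert k (d.getD k [] ++ [w])) d).items
      = d.items ++ (if hs = [] then [] else [(k, hs)]) := by
  induction hs using List.reverseRecOn with
  | nil => simp
  | append_singleton t w ih =>
    rw [List.foldl_append, List.foldl_cons, List.foldl_nil]
    have hall : ∀ p ∈ d.items, (p.1 == k) = false := (pv_contains_eq_false_iff d k).mp hd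
    by_cases ht : t = []
    · subst ht
      simp only [List.foldl_nil, List.nil_append]
      rw [PySem.Dict.getD_of_not_contains d [] hd]
      rw [PySem.Dict.items_insert_of_not_contains d _ hd]
      simp
    · set D := t.foldl (fun d w => d.insert k (d.getD k [] ++ [w])) d with hDdef
      have hDitems : D.items = d.items ++ [(k, t)] := by rw [ih, if_neg ht]
      have hcont : D.contains k = true := by
        simp [PySem.Dict.contains, hDitems]
      have hget : D.getD k [] = t := by
        have hfind : D.items.find? (fun p => p.1 == k) = some (k, t) := by
          rw [hDitems, List.find?_append]
          have hnone : d.items.find? (fun p => p.1 == k) = none := List.find?_eq_none.mpr (by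
            intro p hp; simp [hall p hp])
          simp [hnone]
        simp [PySem.Dict.getD, PySem.Dict.get?, hfind]
      rw [hget, PySem.Dict.items_insert_of_contains D _ hcont, hDitems]
      rw [List.map_append]
      have h1 : d.items.map (fun p => if (p.1 == k) = true then (k, t ++ [w]) else p) = d.items := by
        apply List.map_congr_left ?_ |>.trans (List.map_id _)
        intro p hp; simp [hall p hp]
      rw [h1]
      simp

-- A-side outer loop
lemma pv_outer_items (lt : String) (l : List (String × List String))
    (d : PySem.Dict String (List String))
    (hnd : (l.map Prod.fst).Nodup) (hdis : ∀ p ∈ l, d.contains p.1 = false) :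
    (l.foldl (fun chunk_meta kv =>
        kv.2.foldl (fun d word =>
          if PySem.Str.isIn (PySem.Str.lower word) lt then
            PySem.Dict.modify d kv.1 [] (fun l => l ++ [word])
          else d) chunk_meta) d).items
      = d.items ++ pvCanon lt l := by
  induction l generalizing d with
  | nil => simp [pvCanon]
  | cons kv t ih =>
    rw [List.foldl_cons]
    have hinner : (kv.2.foldl (fun d word =>
          if PySem.Str.isIn (PySem.Str.lower word) lt then
            PySem.Dict.modify d kv.1 [] (fun l => l ++ [word])
          else d) d)
        = (kv.2.filter (pvMatched lt)).foldl (fun d w => d.insert kv.1 (d.getD kv.1 [] ++ [w])) d := by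
      rw [List.foldl_filter]
      rfl
    rw [hinner]
    set hs := kv.2.filter (pvMatched lt) with hhs
    set D := hs.foldl (fun d w => d.insert kv.1 (d.getD kv.1 [] ++ [w])) d with hD
    have hDitems : D.items = d.items ++ (if hs = [] then [] else [(kv.1, hs)]) :=
      pv_inner_items kv.1 hs d (hdis kv (by simp))
    have hk1 : kv.1 ∉ t.map Prod.fst := (List.nodup_cons.mp (by simpa using hnd)).1
    have hdis' : ∀ q ∈ t, D.contains q.1 = false := by
      intro q hq
      have hne' : ¬ kv.1 = q.1 := fun hh => hk1 (hh ▸ List.mem_map_of_mem hq)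
      have hdq : d.contains q.1 = false := hdis q (by simp [hq])
      simp only [PySem.Dict.contains, hDitems, List.any_append]
      simp only [PySem.Dict.contains] at hdq
      rw [hdq]
      by_cases h : hs = [] <;> simp [h, hne']
    rw [ih D (List.nodup_cons.mp (by simpa using hnd)).2 hdis', hDitems]
    have hcanon : pvCanon lt (kv :: t) = (if hs = [] then [] else [(kv.1, hs)]) ++ pvCanon lt t := by
      unfold pvCanon
      rw [List.filterMap_cons]
      by_cases h : hs = []
      · rw [hhs] at h
        simp only [h]
        rw [← hhs] at h
        rw [if_pos h]
        simp
      · have h2 : ¬ kv.2.filter (pvMatched lt) = [] := by rw [← hhs]; exact h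
        simp only [if_neg h2]
        rw [if_neg h]
        simp [← hhs]
    rw [hcanon]
    simp

-- B-side accumulator loop
lemma pv_b_fold (lt : String) (l : List (String × List String)) (acc : List (String × List String)) :
    (l.foldl (fun acc kv =>
        let hits := kv.2.filter (pvMatched lt)
        if hits = [] then acc else acc ++ [(kv.1, hits)]) acc)
      = acc ++ pvCanon lt l := by
  induction l generalizing acc with
  | nil => simp [pvCanon]
  | cons kv t ih =>
    rw [List.foldl_cons]
    by_cases h : kv.2.filter (pvMatched lt) = [] <;>
      simp only [h, reduceIte] <;>
      rw [ih] <;>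
      · by_cases h2 : kv.2.filter (pvMatched lt) = [] <;> simp_all [pvCanon]

-- ===== VERDICT (by name: the statement is the Claim_ definition above) =====
theorem generate_metadata_spec : Claim_equal_generate_metadata := by
  unfold Claim_equal_generate_metadata
  intro text nd _ hpre
  unfold Pre_generate_metadata at hpre
  unfold Spec_generate_metadata
  simp only [generate_metadata, generate_metadata_alt]
  rw [pv_outer_items (PySem.Str.lower text) nd PySem.Dict.empty hpre (by intro p _; rfl)]
  have hpt : ∀ (kv : String × List String), kv ∈ nd → ∀ w ∈ kv.2,
      (PySem.Set.contains
        (PySem.Dict.getD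
          (PySem.Dict.ofList (List.map (fun (L : Int) =>
            ((L, PySem.Set.ofList ((PySem.List.pyRange 0 (PySem.Str.len (PySem.Str.lower text) - L + 1) 1).map
              (fun i => PySem.Str.slice (PySem.Str.lower text) (some i) (some (i + L))))) : Int × PySem.Set String))
            (PySem.Set.ofList (List.flatMap (fun (kv : String × List String) =>
              kv.2.map (fun w => PySem.Str.len (PySem.Str.lower w))) nd))))
          (PySem.Str.len (PySem.Str.lower w)) (PySem.Set.empty : PySem.Set String))
        (PySem.Str.lower w))
      = pvMatched (PySem.Str.lower text) w := by
    intro kv hkv w hw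
    have hmem : PySem.Str.len (PySem.Str.lower w)
        ∈ PySem.Set.ofList (List.flatMap (fun (kv : String × List String) =>
            kv.2.map (fun w => PySem.Str.len (PySem.Str.lower w))) nd) := by
      rw [PySem.Set.mem_ofList]
      exact List.mem_flatMap.mpr ⟨kv, hkv, List.mem_map_of_mem hw⟩
    rw [pv_getD_ofList_map _ _ _ _ hmem]
    apply pv_bool_eq_of_iff
    rw [PySem.Set.contains_iff, PySem.Set.mem_ofList, pv_mem_slices_iff]
    exact Iff.rfl
  have hcong := PySem.List.foldl_congr_mem nd
    (fun (acc : List (String × List String)) kv =>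
      let hits := kv.2.filter (fun w =>
        PySem.Set.contains
          (PySem.Dict.getD
            (PySem.Dict.ofList (List.map (fun (L : Int) =>
              ((L, PySem.Set.ofList ((PySem.List.pyRange 0 (PySem.Str.len (PySem.Str.lower text) - L + 1) 1).map
                (fun i => PySem.Str.slice (PySem.Str.lower text) (some i) (some (i + L))))) : Int × PySem.Set String))
              (PySem.Set.ofList (List.flatMap (fun (kv : String × List String) =>
                kv.2.map (fun w => PySem.Str.len (PySem.Str.lower w))) nd))))
            (PySem.Str.len (PySem.Str.lower w)) (PySem.Set.empty : PySem.Set String))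
          (PySem.Str.lower w))
      if hits = [] then acc else acc ++ [(kv.1, hits)])
    (fun (acc : List (String × List String)) kv =>
      let hits := kv.2.filter (pvMatched (PySem.Str.lower text))
      if hits = [] then acc else acc ++ [(kv.1, hits)])
    ([] : List (String × List String))
    (by
      intro acc kv hkv
      simp only
      rw [List.filter_congr (hpt kv hkv)])
  rw [hcong, pv_b_fold]
  have hnodup : ((pvCanon (PySem.Str.lower text) nd).map Prod.fst).Nodup :=
    (pv_canon_keys_sublist (PySem.Str.lower text) nd).nodup hpre
  have hofl : PySem.Dict.ofList (pvCanon (PySem.Str.lower text) nd)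
      = PySem.Dict.update PySem.Dict.empty (pvCanon (PySem.Str.lower text) nd) := rfl
  rw [List.nil_append, hofl,
    pv_items_update_of_nodup _ _ hnodup (by intro p _; rfl)]
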